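-- pv_equiv track=rewrite | github.com/Dedzsinator/pyHMSSQL | server/parser.py | _process_from_clause
-- ===== SOURCE A (Python) =====
-- def _process_from_clause(tables_part):
--     """Process FROM clause to extract table names."""
--     # Fix: Only extract the table name part before any clauses like WHERE, ORDER BY, etc.
--     end_clauses = [" WHERE ", " ORDER BY ", " GROUP BY ", " HAVING ", " LIMIT "]
--
--     # Find the position of the first clause marker
--     end_pos = len(tables_part)
--     for clause in end_clauses:
--         pos = tables_part.upper().find(clause)
--         if pos != -1 and pos < end_pos:
--             end_pos = pos
--
--     # Extract only the table portion
--     table_part = tables_part[:end_pos].strip()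
--
--     # Now split by commas for multiple tables
--     if " JOIN " not in table_part:
--         tables = [t.strip() for t in table_part.split(",")]
--         return tables
--     else:
--         # Handle JOIN syntax (existing code)
--         return []
-- ===== SOURCE B (Python) =====
-- def _process_from_clause(tables_part):
--     """Process FROM clause to extract table names."""
--     markers = (" WHERE ", " ORDER BY ", " GROUP BY ", " HAVING ", " LIMIT ")
--     upper = tables_part.upper()
--     # Single left-to-right scan: first position where any clause marker starts.
--     end_pos = len(tables_part)
--     for i in range(len(upper)):
--         if upper.startswith(markers, i):
--             end_pos = i
--             break
--     table_part = tables_part[:end_pos].strip()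
--     if " JOIN " in table_part:
--         return []
--     return [t.strip() for t in table_part.split(",")]
-- ===== Notes on version B (the rewrite author's own statement) =====
-- stated objective: alternative
-- what changed: Replaces the five per-marker upper().find() calls with their running minimum by a single left-to-right scan of the uppercased string that stops at the first position where any clause marker starts (tuple startswith); the strip / JOIN-check / comma-split tail is unchanged.
import Mathlib
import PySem

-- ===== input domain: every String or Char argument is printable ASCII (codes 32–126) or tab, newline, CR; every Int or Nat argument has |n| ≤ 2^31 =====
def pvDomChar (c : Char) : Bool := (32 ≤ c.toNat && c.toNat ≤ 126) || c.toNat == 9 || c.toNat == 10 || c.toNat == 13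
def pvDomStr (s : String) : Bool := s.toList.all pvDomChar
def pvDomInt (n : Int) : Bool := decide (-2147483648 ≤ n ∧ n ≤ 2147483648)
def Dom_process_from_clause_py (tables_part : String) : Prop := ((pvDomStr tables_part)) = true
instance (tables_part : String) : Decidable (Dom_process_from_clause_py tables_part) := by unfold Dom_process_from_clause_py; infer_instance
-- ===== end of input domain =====

-- B replaces A's five per-marker find-and-min passes by a single left-to-right scan for the
-- first position where any clause marker starts (alternative decomposition, same cost).


-- ===== PORT A =====
def pvEndClauses : List (List Char) :=
  [" WHERE ".toList, " ORDER BY ".toList, " GROUP BY ".toList, " HAVING ".toList, " LIMIT ".toList]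

def process_from_clause_py (tables_part : String) : List String :=
  let s := tables_part.toList
  -- end_pos = len(tables_part); for clause in end_clauses: pos = tables_part.upper().find(clause); …
  let endPos : Int := pvEndClauses.foldl (fun e clause =>
      let pos := PySem.Chars.find (PySem.Chars.upper s) clause
      if pos ≠ -1 ∧ pos < e then pos else e) ((s.length : Int))
  let tablePart := PySem.Chars.strip (PySem.List.slice s none (some endPos))
  if PySem.Chars.isIn " JOIN ".toList tablePart then []
  else (PySem.Chars.splitOn tablePart [',']).map (fun t => String.ofList (PySem.Chars.strip t))

-- ===== PORT B =====
def pvMarkers : List (List Char) :=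
  [" WHERE ".toList, " ORDER BY ".toList, " GROUP BY ".toList, " HAVING ".toList, " LIMIT ".toList]

-- for i in range(len(upper)): if upper.startswith(markers, i): return i  (else fall through to len)
def pvScanAux : List Char → Nat → Nat
  | [], i => i
  | c :: rest, i =>
    if pvMarkers.any (fun m => PySem.Chars.startswith (c :: rest) m) then i
    else pvScanAux rest (i + 1)

def process_from_clause_py_alt (tables_part : String) : List String :=
  let s := tables_part.toList
  let endPos : Nat := pvScanAux (PySem.Chars.upper s) 0
  let tablePart := PySem.Chars.strip (s.take endPos)
  if PySem.Chars.isIn " JOIN ".toList tablePart then []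
  else (PySem.Chars.splitOn tablePart [',']).map (fun t => String.ofList (PySem.Chars.strip t))

-- ===== PRECONDITION & SPEC =====
def Spec_process_from_clause_py (tables_part : String) (out : List String) : Prop := out = process_from_clause_py_alt tables_part
instance (tables_part : String) (out : List String) : Decidable (Spec_process_from_clause_py tables_part out) := by unfold Spec_process_from_clause_py; infer_instance

-- ===== CLAIM (what is proved, stated in full; the proofs are below) =====
def Claim_equal_process_from_clause_py : Prop := ∀ (tables_part : String), Dom_process_from_clause_py tables_part → Spec_process_from_clause_py tables_part (process_from_clause_py tables_part)

-- ===== LEMMAS AND PROOFS =====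

-- some marker of cs starts at position j of u
def pvHit (cs : List (List Char)) (u : List Char) (j : Nat) : Prop := ∃ m ∈ cs, m <+: u.drop j

-- e is the position of the first marker hit in u (or u.length if none)
def pvGood (cs : List (List Char)) (u : List Char) (e : Int) : Prop :=
  0 ≤ e ∧ e ≤ u.length ∧ (∀ j : Nat, (j : Int) < e → ¬ pvHit cs u j) ∧
    (e = u.length ∨ pvHit cs u e.toNat)

theorem pvGood_not_lt {cs : List (List Char)} {u : List Char} {e e' : Int}
    (h : pvGood cs u e) (h' : pvGood cs u e') : ¬ e < e' := by
  intro hlt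
  rcases h with ⟨he0, heL, _, hlast⟩
  rcases h' with ⟨_, h'L, h'min, _⟩
  rcases hlast with heq | hhit
  · omega
  · exact h'min e.toNat (by omega) hhit

theorem pvGood_uniq {cs : List (List Char)} {u : List Char} {e e' : Int}
    (h : pvGood cs u e) (h' : pvGood cs u e') : e = e' := by
  rcases lt_trichotomy e e' with hlt | heq | hgt
  · exact absurd hlt (pvGood_not_lt h h')
  · exact heq
  · exact absurd hgt (pvGood_not_lt h' h)

theorem pvStep_good {u : List Char} {done : List (List Char)} {e : Int} (c : List Char)
    (h : pvGood done u e) :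
    pvGood (done ++ [c]) u
      (if PySem.Chars.find u c ≠ -1 ∧ PySem.Chars.find u c < e then PySem.Chars.find u c else e) := by
  rcases h with ⟨he0, heL, hmin, hlast⟩
  split_ifs with hc
  · rcases hc with ⟨hne, hlt⟩
    have hinf : c <:+: u := (PySem.Chars.find_ne_neg_one_iff u c).mp hne
    have hpos : 0 ≤ PySem.Chars.find u c := (PySem.Chars.find_nonneg_iff u c).mpr hinf
    have hspec := PySem.Chars.find_spec (s := u) (sub := c) hpos
    refine ⟨hpos, PySem.Chars.find_le_length u c, ?_, Or.inr ⟨c, by simp, hspec.1⟩⟩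
    intro j hj ⟨m, hm, hpre⟩
    rcases List.mem_append.mp hm with hm | hm
    · exact hmin j (by omega) ⟨m, hm, hpre⟩
    · have : m = c := by simpa using hm
      subst this
      exact hspec.2 j (by omega) hpre
  · refine ⟨he0, heL, ?_, ?_⟩
    · intro j hj ⟨m, hm, hpre⟩
      rcases List.mem_append.mp hm with hm | hm
      · exact hmin j hj ⟨m, hm, hpre⟩
      · have hmc : m = c := by simpa using hm
        subst hmc
        have hinf : m <:+: u := hpre.isInfix.trans (List.drop_suffix j u).isInfix
        have hne : PySem.Chars.find u m ≠ -1 := (PySem.Chars.find_ne_neg_one_iff u m).mpr hinf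
        have hge : e ≤ PySem.Chars.find u m := by
          by_contra hlt
          exact hc ⟨hne, by omega⟩
        have hpos : 0 ≤ PySem.Chars.find u m := (PySem.Chars.find_nonneg_iff u m).mpr hinf
        exact (PySem.Chars.find_spec (s := u) (sub := m) hpos).2 j (by omega) hpre
    · rcases hlast with heq | hhit
      · exact Or.inl heq
      · exact Or.inr ⟨hhit.choose, List.mem_append.mpr (Or.inl hhit.choose_spec.1), hhit.choose_spec.2⟩

theorem pvFold_good (u : List Char) :
    ∀ (cs done : List (List Char)) (e : Int), pvGood done u e →
      pvGood (done ++ cs) u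
        (cs.foldl (fun e clause =>
          let pos := PySem.Chars.find u clause
          if pos ≠ -1 ∧ pos < e then pos else e) e) := by
  intro cs
  induction cs with
  | nil => intro done e h; simpa using h
  | cons c cs ih =>
    intro done e h
    have h1 := pvStep_good (u := u) (done := done) (e := e) c h
    have h2 := ih (done ++ [c]) _ h1
    simpa [List.append_assoc] using h2

theorem pvScanAux_shift (u : List Char) : ∀ i : Nat, pvScanAux u i = i + pvScanAux u 0 := by
  induction u with
  | nil => intro i; simp [pvScanAux]
  | cons c rest ih =>
    intro i
    by_cases h : pvMarkers.any (fun m => PySem.Chars.startswith (c :: rest) m)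
    · simp [pvScanAux, h]
    · have hstep : ∀ k, pvScanAux (c :: rest) k = pvScanAux rest (k + 1) := fun k => by
        simp [pvScanAux, h]
      rw [hstep i, hstep 0, ih (i + 1), ih 1]
      omega

theorem pvScan_good (u : List Char) : pvGood pvMarkers u ((pvScanAux u 0 : Nat) : Int) := by
  induction u with
  | nil =>
    refine ⟨by simp [pvScanAux], by simp [pvScanAux], ?_, Or.inl (by simp [pvScanAux])⟩
    intro j hj hx
    simp [pvScanAux] at hj
    omega
  | cons c rest ih =>
    by_cases h : pvMarkers.any (fun m => PySem.Chars.startswith (c :: rest) m)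
    · rcases List.any_eq_true.mp h with ⟨m, hm, hsw⟩
      refine ⟨by simp [pvScanAux, h], by simp [pvScanAux, h]; positivity, ?_, Or.inr ?_⟩
      · intro j hj; simp [pvScanAux, h] at hj; omega
      · refine ⟨m, hm, ?_⟩
        simpa [pvScanAux, h] using (PySem.Chars.startswith_iff _ _).mp hsw
    · have hrw : pvScanAux (c :: rest) 0 = 1 + pvScanAux rest 0 := by
        simp only [pvScanAux, h]
        exact pvScanAux_shift rest 1
      rcases ih with ⟨_, ihL, ihmin, ihlast⟩
      refine ⟨by omega, ?_, ?_, ?_⟩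
      · simp only [hrw, List.length_cons]; omega
      · intro j hj hhit
        rcases hhit with ⟨m, hm, hpre⟩
        match j with
        | 0 =>
          have h' := List.any_eq_false.mp (by simpa using h)
          exact h' m hm ((PySem.Chars.startswith_iff _ _).mpr (by simpa using hpre))
        | Nat.succ k =>
          have hk : (k : Int) < (pvScanAux rest 0 : Nat) := by omega
          exact ihmin k hk ⟨m, hm, by simpa [List.drop_succ_cons] using hpre⟩
      · rcases ihlast with heq | hhit
        · exact Or.inl (by simp only [hrw, List.length_cons]; omega)
        · refine Or.inr ?_
          rcases hhit with ⟨m, hm, hpre⟩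
          refine ⟨m, hm, ?_⟩
          have hT : ((((pvScanAux (c :: rest) 0 : Nat)) : Int)).toNat = pvScanAux rest 0 + 1 := by
            rw [hrw]; omega
          have hpre' : m <+: rest.drop (pvScanAux rest 0) := by simpa using hpre
          rw [hT]
          simpa [List.drop_succ_cons] using hpre'

theorem pvUpper_length (s : List Char) : (PySem.Chars.upper s).length = s.length := by
  simp [PySem.Chars.upper]

-- ===== VERDICT (by name: the statement is the Claim_ definition above) =====
theorem process_from_clause_py_spec : Claim_equal_process_from_clause_py := by
  intro tables_part _
  unfold Spec_process_from_clause_py process_from_clause_py process_from_clause_py_alt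
  set s := tables_part.toList with hs
  set u := PySem.Chars.upper s with hu
  have hbase : pvGood [] u ((s.length : Int)) := by
    refine ⟨by positivity, by rw [pvUpper_length], ?_, Or.inl (by rw [pvUpper_length])⟩
    intro j _ ⟨m, hm, _⟩
    simp at hm
  have hA := pvFold_good u pvEndClauses [] (s.length : Int) hbase
  have hB := pvScan_good u
  have hmk : pvEndClauses = pvMarkers := rfl
  rw [List.nil_append, hmk] at hA
  have heq : (pvEndClauses.foldl (fun e clause =>
      let pos := PySem.Chars.find u clause
      if pos ≠ -1 ∧ pos < e then pos else e) ((s.length : Int)))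
      = ((pvScanAux u 0 : Nat) : Int) := pvGood_uniq (hmk ▸ hA) hB
  simp only []
  rw [heq, PySem.List.slice_to_natCast]
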